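-- pv_equiv track=rewrite | github.com/renanrv4/IP_list | List5/q5.py | gerar_combinacoes
-- ===== SOURCE A (Python) =====
-- def gerar_combinacoes(valores, indice=0, combinacao=[]):
--
--     if indice == len(valores):
--         # Se atingiu o fim da lista de valores, retorna a combinação atual
--         return [combinacao]
--
--     # Lista de Valores e variável que indica se existe uma possibilidade
--     combinacoes = []
--     existe_opcao = False
--
--     # Loop que observa os valores na lista para criar as combinações
--     for valor in valores[indice]:
--         # Se o valor não estiver na combinção ele é adicionado
--         if valor not in combinacao:
--             novas_combinacoes = gerar_combinacoes(valores, indice + 1, combinacao + [valor])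
--             combinacoes.extend(novas_combinacoes)
--             existe_opcao = True
--
--     # Se não existe nenhuma outra opção então é adicionado a string 'nada'
--     if not existe_opcao:
--         novas_combinacoes = gerar_combinacoes(valores, indice + 1, combinacao + ['nada'])
--         combinacoes.extend(novas_combinacoes)
--
--     return combinacoes
-- ===== SOURCE B (Python) =====
-- def gerar_combinacoes(valores, indice=0, combinacao=[]):
--     # Iterative worklist instead of recursion: expand partial combos level by level.
--     combinacoes = [combinacao]
--     for i in range(indice, len(valores)):
--         novas = []
--         for combo in combinacoes:
--             achou = False
--             for valor in valores[i]:
--                 if valor not in combo: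
--                     novas.append(combo + [valor])
--                     achou = True
--             if not achou:
--                 novas.append(combo + ['nada'])
--         combinacoes = novas
--     return combinacoes
-- ===== Notes on version B (the rewrite author's own statement) =====
-- stated objective: alternative
-- what changed: Replaces A's depth-first recursion (one recursive call per admissible value plus a 'nada' fallback) by an iterative breadth-first worklist that expands all partial combinations level by level, preserving the leaf order.
import Mathlib
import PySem

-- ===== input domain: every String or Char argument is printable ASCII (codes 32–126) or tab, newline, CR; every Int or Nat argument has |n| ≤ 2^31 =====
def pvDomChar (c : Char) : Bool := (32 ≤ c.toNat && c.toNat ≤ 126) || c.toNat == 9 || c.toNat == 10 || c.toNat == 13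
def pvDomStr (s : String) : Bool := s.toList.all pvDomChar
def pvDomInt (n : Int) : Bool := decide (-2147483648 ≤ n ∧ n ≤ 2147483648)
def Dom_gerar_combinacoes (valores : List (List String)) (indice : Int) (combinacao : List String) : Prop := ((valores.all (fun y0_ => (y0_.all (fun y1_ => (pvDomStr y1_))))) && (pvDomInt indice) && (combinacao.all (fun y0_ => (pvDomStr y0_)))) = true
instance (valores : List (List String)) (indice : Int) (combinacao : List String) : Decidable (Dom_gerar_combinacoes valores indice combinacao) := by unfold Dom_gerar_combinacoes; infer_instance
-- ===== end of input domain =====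

-- B replaces A's depth-first recursion by an iterative level-by-level worklist expansion
-- (same leaf order); equivalence of return values is proved on Pre_ (where Python A returns).

-- ===== PORT A =====
-- Literal port of A's recursion; the Nat fuel only makes the recursion total
-- (inside Pre_ the fuel (len - indice).toNat + 1 is never exhausted).
def gerar_combinacoes_fuel : Nat → List (List String) → Int → List String → List (List String)
  | 0, _, _, _ => []
  | fuel+1, valores, indice, combinacao =>
    if indice = (valores.length : Int) then [combinacao]
    else
      -- valores[indice]; .getD [] is unreachable inside Pre_ (Python raises IndexError there)
      let row := (PySem.List.pyGet? valores indice).getD []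
      let st := row.foldl (fun (st : List (List String) × Bool) valor =>
          if !(combinacao.contains valor) then
            (st.1 ++ gerar_combinacoes_fuel fuel valores (indice+1) (combinacao ++ [valor]), true)
          else st) ([], false)
      if !st.2 then st.1 ++ gerar_combinacoes_fuel fuel valores (indice+1) (combinacao ++ ["nada"])
      else st.1

def gerar_combinacoes (valores : List (List String)) (indice : Int) (combinacao : List String) : List (List String) :=
  gerar_combinacoes_fuel ((((valores.length : Int) - indice).toNat) + 1) valores indice combinacao

-- ===== PORT B =====
def gerar_combinacoes_alt (valores : List (List String)) (indice : Int) (combinacao : List String) : List (List String) :=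
  (PySem.List.pyRange indice (valores.length : Int) 1).foldl
    (fun combinacoes i =>
      combinacoes.foldl (fun novas combo =>
        let row := (PySem.List.pyGet? valores i).getD []
        let st := row.foldl (fun (st : List (List String) × Bool) valor =>
            if !(combo.contains valor) then (st.1 ++ [combo ++ [valor]], true) else st)
          (novas, false)
        if !st.2 then st.1 ++ [combo ++ ["nada"]] else st.1) [])
    [combinacao]

-- ===== PRECONDITION & SPEC =====
-- Pre_: exactly where Python A returns; outside it valores[indice] raises IndexError.
def Pre_gerar_combinacoes (valores : List (List String)) (indice : Int) (combinacao : List String) : Prop :=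
  -(valores.length : Int) ≤ indice ∧ indice ≤ (valores.length : Int)
instance (valores : List (List String)) (indice : Int) (combinacao : List String) : Decidable (Pre_gerar_combinacoes valores indice combinacao) := by unfold Pre_gerar_combinacoes; infer_instance

def pvWitness_gerar_combinacoes : List (List String) × Int × List String := ([["a", "b"], ["b"]], 0, [])

def Spec_gerar_combinacoes (valores : List (List String)) (indice : Int) (combinacao : List String) (out : List (List String)) : Prop := out = gerar_combinacoes_alt valores indice combinacao
instance (valores : List (List String)) (indice : Int) (combinacao : List String) (out : List (List String)) : Decidable (Spec_gerar_combinacoes valores indice combinacao out) := by unfold Spec_gerar_combinacoes; infer_instance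

-- ===== CLAIM (what is proved, stated in full; the proofs are below) =====
def Claim_equal_gerar_combinacoes : Prop := ∀ (valores : List (List String)) (indice : Int) (combinacao : List String), Dom_gerar_combinacoes valores indice combinacao → Pre_gerar_combinacoes valores indice combinacao → Spec_gerar_combinacoes valores indice combinacao (gerar_combinacoes valores indice combinacao)


-- ===== LEMMAS AND PROOFS =====

-- Shared vocabulary for the proof: the per-level child step of one partial combination.
def pvKidsStep (combo : List String) (st : List (List String) × Bool) (valor : String) : List (List String) × Bool :=
  if !(combo.contains valor) then (st.1 ++ [combo ++ [valor]], true) else st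

def pvPerCombo (row : List String) (combo : List String) : List (List String) :=
  let st := row.foldl (pvKidsStep combo) ([], false)
  if !st.2 then st.1 ++ [combo ++ ["nada"]] else st.1

-- accumulator lemma for the kids fold
theorem pvKids_acc (row : List String) (combo : List String) :
    ∀ (acc : List (List String)) (b : Bool),
      row.foldl (pvKidsStep combo) (acc, b)
        = (acc ++ (row.foldl (pvKidsStep combo) ([], b)).1, (row.foldl (pvKidsStep combo) ([], b)).2) := by
  induction row with
  | nil => intro acc b; simp
  | cons v row ih =>
    intro acc b
    by_cases h : v ∈ combo
    · have e : ∀ (a : List (List String)) (bb : Bool), pvKidsStep combo (a, bb) v = (a, bb) := by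
        intro a bb; simp [pvKidsStep, h]
      simp only [List.foldl_cons, e]
      exact ih acc b
    · have e : ∀ (a : List (List String)) (bb : Bool),
          pvKidsStep combo (a, bb) v = (a ++ [combo ++ [v]], true) := by
        intro a bb; simp [pvKidsStep, h]
      simp only [List.foldl_cons, e]
      rw [ih (acc ++ [combo ++ [v]]) true, ih ([] ++ [combo ++ [v]]) true]
      simp

-- A's inner fold equals the kids fold with each child replaced by f child, flag unchanged
theorem pvAfold (row : List String) (combo : List String) (f : List String → List (List String)) :
    ∀ (acc : List (List String)) (b : Bool),
      row.foldl (fun (st : List (List String) × Bool) valor =>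
          if !(combo.contains valor) then (st.1 ++ f (combo ++ [valor]), true) else st) (acc, b)
        = (acc ++ ((row.foldl (pvKidsStep combo) ([], b)).1).flatMap f,
           (row.foldl (pvKidsStep combo) ([], b)).2) := by
  induction row with
  | nil => intro acc b; simp
  | cons v row ih =>
    intro acc b
    by_cases h : v ∈ combo
    · have e1 : ∀ (a : List (List String)) (bb : Bool),
          (if !(combo.contains v) then (a ++ f (combo ++ [v]), true) else (a, bb)) = (a, bb) := by
        intro a bb; simp [h]
      have e2 : ∀ (a : List (List String)) (bb : Bool), pvKidsStep combo (a, bb) v = (a, bb) := by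
        intro a bb; simp [pvKidsStep, h]
      simp only [List.foldl_cons, e1, e2]
      exact ih acc b
    · have e1 : ∀ (a : List (List String)) (bb : Bool),
          (if !(combo.contains v) then (a ++ f (combo ++ [v]), true) else (a, bb)) = (a ++ f (combo ++ [v]), true) := by
        intro a bb; simp [h]
      have e2 : ∀ (a : List (List String)) (bb : Bool),
          pvKidsStep combo (a, bb) v = (a ++ [combo ++ [v]], true) := by
        intro a bb; simp [pvKidsStep, h]
      simp only [List.foldl_cons, e1, e2]
      rw [ih (acc ++ f (combo ++ [v])) true,
          pvKids_acc row combo ([] ++ [combo ++ [v]]) true]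
      simp

-- B's per-level fold is a flatMap of pvPerCombo
theorem pvStep_flat (valores : List (List String)) (i : Int) (combos : List (List String)) :
      (combos.foldl (fun novas combo =>
        let row := (PySem.List.pyGet? valores i).getD []
        let st := row.foldl (fun (st : List (List String) × Bool) valor =>
            if !(combo.contains valor) then (st.1 ++ [combo ++ [valor]], true) else st)
          (novas, false)
        if !st.2 then st.1 ++ [combo ++ ["nada"]] else st.1) [])
      = combos.flatMap (pvPerCombo ((PySem.List.pyGet? valores i).getD [])) := by
  have hstep : (fun (novas : List (List String)) (combo : List String) =>
        let row := (PySem.List.pyGet? valores i).getD []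
        let st := row.foldl (fun (st : List (List String) × Bool) valor =>
            if !(combo.contains valor) then (st.1 ++ [combo ++ [valor]], true) else st)
          (novas, false)
        if !st.2 then st.1 ++ [combo ++ ["nada"]] else st.1)
      = (fun novas combo => novas ++ pvPerCombo ((PySem.List.pyGet? valores i).getD []) combo) := by
    funext novas combo
    show (let st := ((PySem.List.pyGet? valores i).getD []).foldl (pvKidsStep combo) (novas, false);
          if !st.2 then st.1 ++ [combo ++ ["nada"]] else st.1) = _
    rw [show (((PySem.List.pyGet? valores i).getD []).foldl (pvKidsStep combo) (novas, false))
          = (novas ++ (((PySem.List.pyGet? valores i).getD []).foldl (pvKidsStep combo) ([], false)).1,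
             (((PySem.List.pyGet? valores i).getD []).foldl (pvKidsStep combo) ([], false)).2)
        from pvKids_acc _ combo novas false]
    unfold pvPerCombo
    by_cases h : (((PySem.List.pyGet? valores i).getD []).foldl (pvKidsStep combo) ([], false)).2 <;> simp [h]
  rw [hstep, PySem.List.foldl_append_eq_flatMap]
  simp

-- folding flatMap-steps over a worklist decomposes pointwise
theorem pvFoldl_flatMap_decomp (F : Int → List String → List (List String)) :
    ∀ (l : List Int) (acc : List (List String)),
      l.foldl (fun combos i => combos.flatMap (F i)) acc
        = acc.flatMap (fun c => l.foldl (fun combos i => combos.flatMap (F i)) [c]) := by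
  intro l
  induction l with
  | nil => intro acc; simp
  | cons i l ih =>
    intro acc
    simp only [List.foldl_cons]
    rw [ih (acc.flatMap (F i)), List.flatMap_assoc]
    congr 1
    funext c
    rw [ih (List.flatMap (F i) [c])]
    simp

-- B in flatMap-step normal form
theorem pvB_eq (valores : List (List String)) (indice : Int) (combinacao : List String) :
    gerar_combinacoes_alt valores indice combinacao
      = (PySem.List.pyRange indice (valores.length : Int) 1).foldl
          (fun combos i => combos.flatMap (pvPerCombo ((PySem.List.pyGet? valores i).getD []))) [combinacao] := by
  unfold gerar_combinacoes_alt
  congr 1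
  funext combos i
  exact pvStep_flat valores i combos

-- one-level unfolding of B below the final index
theorem pvB_cons (valores : List (List String)) (i : Int) (c : List String)
    (h : i < (valores.length : Int)) :
    gerar_combinacoes_alt valores i c
      = (pvPerCombo ((PySem.List.pyGet? valores i).getD []) c).flatMap
          (fun c' => gerar_combinacoes_alt valores (i+1) c') := by
  rw [pvB_eq, PySem.List.pyRange_one_cons h, List.foldl_cons]
  rw [pvFoldl_flatMap_decomp]
  simp only [List.flatMap_singleton]
  congr 1
  funext c'
  rw [pvB_eq]

-- closed unfolding of A's recursion below the final index (no lets)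
theorem pvA_unfold (valores : List (List String)) (fuel : Nat) (i : Int) (c : List String)
    (h : ¬ i = (valores.length : Int)) :
    gerar_combinacoes_fuel (fuel+1) valores i c
      = (if !((((PySem.List.pyGet? valores i).getD []).foldl (fun (st : List (List String) × Bool) valor =>
              if !(c.contains valor) then
                (st.1 ++ gerar_combinacoes_fuel fuel valores (i+1) (c ++ [valor]), true)
              else st) ([], false)).2)
         then (((PySem.List.pyGet? valores i).getD []).foldl (fun (st : List (List String) × Bool) valor =>
              if !(c.contains valor) then
                (st.1 ++ gerar_combinacoes_fuel fuel valores (i+1) (c ++ [valor]), true)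
              else st) ([], false)).1 ++ gerar_combinacoes_fuel fuel valores (i+1) (c ++ ["nada"])
         else (((PySem.List.pyGet? valores i).getD []).foldl (fun (st : List (List String) × Bool) valor =>
              if !(c.contains valor) then
                (st.1 ++ gerar_combinacoes_fuel fuel valores (i+1) (c ++ [valor]), true)
              else st) ([], false)).1) := by
  conv_lhs => rw [gerar_combinacoes_fuel]
  rw [if_neg h]

theorem pvMain (valores : List (List String)) :
    ∀ (fuel : Nat) (i : Int) (c : List String),
      (((valores.length : Int) - i).toNat) < fuel → i ≤ (valores.length : Int) →
      gerar_combinacoes_fuel fuel valores i c = gerar_combinacoes_alt valores i c := by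
  intro fuel
  induction fuel with
  | zero => intro i c hf _; omega
  | succ fuel ih =>
    intro i c hf hle
    by_cases heq : i = (valores.length : Int)
    · subst heq
      rw [pvB_eq, PySem.List.pyRange_one_eq_nil (le_refl _)]
      simp [gerar_combinacoes_fuel]
    · have hlt : i < (valores.length : Int) := lt_of_le_of_ne hle heq
      have hind : ∀ c', gerar_combinacoes_fuel fuel valores (i+1) c' = gerar_combinacoes_alt valores (i+1) c' := by
        intro c'; exact ih (i+1) c' (by omega) (by omega)
      rw [pvB_cons valores i c hlt, pvA_unfold valores fuel i c heq]
      rw [pvAfold ((PySem.List.pyGet? valores i).getD []) c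
            (fun c' => gerar_combinacoes_fuel fuel valores (i+1) c') [] false]
      unfold pvPerCombo
      by_cases hfl : (((PySem.List.pyGet? valores i).getD []).foldl (pvKidsStep c) ([], false)).2
      · simp only [hfl, Bool.not_true, Bool.false_eq_true, if_false, List.nil_append]
        congr 1
        funext c'; exact hind c'
      · simp only [hfl, Bool.not_false, if_true, List.nil_append]
        rw [List.flatMap_append, List.flatMap_singleton]
        congr 1
        · congr 1
          funext c'; exact hind c'
        · exact hind (c ++ ["nada"])

-- ===== VERDICT (by name: the statement is the Claim_ definition above) =====
theorem gerar_combinacoes_spec : Claim_equal_gerar_combinacoes := by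
  intro valores indice combinacao _ hpre
  unfold Spec_gerar_combinacoes gerar_combinacoes
  exact pvMain valores _ indice combinacao (by omega) hpre.2
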